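-- pv_equiv track=rewrite | github.com/pilotwaffle/testing-bot | strategy_analyzer.py | _is_strategy_class
-- ===== SOURCE A (Python) =====
-- from typing import Dict, List, Any, Optional
--
-- def _is_strategy_class(class_name: str, methods: List[str]) -> bool:
--     """Determine if a class is likely a trading strategy"""
--
--     strategy_indicators = [
--         'strategy' in class_name.lower(),
--         'trading' in class_name.lower(),
--         any(method in ['execute', 'run', 'trade', 'signal', 'generate_signal'] for method in methods),
--         any(method.startswith('on_') for method in methods),
--         'init' in methods or '__init__' in methods
--     ]
--
--     return sum(strategy_indicators) >= 2
-- ===== SOURCE B (Python) =====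
-- def _is_strategy_class(class_name, methods):
--     """Determine if a class is likely a trading strategy.
--
--     Budgeted early-exit search: the name checks set how many more indicator
--     categories are still needed; the method scan stops the moment that budget
--     is met (possibly before looking at any method at all)."""
--     name = class_name.lower()
--     need = 2 - ('strategy' in name) - ('trading' in name)
--     core = on = init = False
--     for m in methods:
--         if core + on + init >= need:
--             break
--         core = core or m in ('execute', 'run', 'trade', 'signal', 'generate_signal')
--         on = on or m.startswith('on_')
--         init = init or m in ('init', '__init__')
--     return core + on + init >= need
-- ===== Notes on version B (the rewrite author's own statement) =====
-- stated objective: alternative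
-- what changed: Replaces A's compute-all-five-indicators-then-count with a budgeted early-exit scan: the two name checks set a remaining budget (2, 1 or 0) and the method loop breaks as soon as enough indicator categories are found, never materialising the full indicator list.
import Mathlib
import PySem

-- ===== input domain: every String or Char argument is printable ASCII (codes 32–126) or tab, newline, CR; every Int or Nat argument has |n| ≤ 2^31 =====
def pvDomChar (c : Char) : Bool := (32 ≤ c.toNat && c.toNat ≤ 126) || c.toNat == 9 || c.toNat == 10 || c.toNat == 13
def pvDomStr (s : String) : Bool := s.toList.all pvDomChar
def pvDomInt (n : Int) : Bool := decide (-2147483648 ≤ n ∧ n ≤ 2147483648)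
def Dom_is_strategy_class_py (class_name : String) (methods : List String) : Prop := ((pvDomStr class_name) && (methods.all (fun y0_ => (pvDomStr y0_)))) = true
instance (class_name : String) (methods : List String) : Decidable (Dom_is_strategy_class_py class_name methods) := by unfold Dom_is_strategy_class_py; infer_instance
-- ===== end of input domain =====

-- B replaces A's compute-all-indicators-then-count with a budgeted early-exit scan of methods (ported as structural recursion) (alternative decomposition).


-- ===== PORT A =====
def is_strategy_class_py (class_name : String) (methods : List String) : Bool :=
  let i1 : Bool := PySem.Str.isIn "strategy" (PySem.Str.lower class_name)
  let i2 : Bool := PySem.Str.isIn "trading" (PySem.Str.lower class_name)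
  let i3 : Bool := methods.any (fun m => decide (m ∈ ["execute", "run", "trade", "signal", "generate_signal"]))
  let i4 : Bool := methods.any (fun m => PySem.Str.startswith m "on_")
  let i5 : Bool := decide ("init" ∈ methods) || decide ("__init__" ∈ methods)
  decide ((if i1 then (1:Nat) else 0) + (if i2 then 1 else 0) + (if i3 then 1 else 0)
          + (if i4 then 1 else 0) + (if i5 then 1 else 0) ≥ 2)

-- ===== PORT B =====
-- helper `_scan`: early-exit recursion; `need` is an Int (it can be 0 or negative, meaning immediate True)
def scan_is_strategy (methods : List String) (need : Int) (core on_ init : Bool) : Bool :=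
  if ((if core then (1:Int) else 0) + (if on_ then 1 else 0) + (if init then 1 else 0)) ≥ need then
    true
  else
    match methods with
    | [] => false
    | m :: rest =>
        scan_is_strategy rest need
          (core || decide (m ∈ ["execute", "run", "trade", "signal", "generate_signal"]))
          (on_ || PySem.Str.startswith m "on_")
          (init || (m == "init" || m == "__init__"))

def is_strategy_class_py_alt (class_name : String) (methods : List String) : Bool :=
  let name := PySem.Str.lower class_name
  let need : Int := 2 - (if PySem.Str.isIn "strategy" name then 1 else 0)
                      - (if PySem.Str.isIn "trading" name then 1 else 0)
  scan_is_strategy methods need false false false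

-- ===== PRECONDITION & SPEC =====
def Spec_is_strategy_class_py (class_name : String) (methods : List String) (out : Bool) : Prop := out = is_strategy_class_py_alt class_name methods
instance (class_name : String) (methods : List String) (out : Bool) : Decidable (Spec_is_strategy_class_py class_name methods out) := by unfold Spec_is_strategy_class_py; infer_instance

-- ===== CLAIM (what is proved, stated in full; the proofs are below) =====
def Claim_equal_is_strategy_class_py : Prop := ∀ (class_name : String) (methods : List String), Dom_is_strategy_class_py class_name methods → Spec_is_strategy_class_py class_name methods (is_strategy_class_py class_name methods)

-- ===== LEMMAS AND PROOFS =====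

def cntB (a b c : Bool) : Int :=
  (if a then (1:Int) else 0) + (if b then 1 else 0) + (if c then 1 else 0)

theorem cnt_mono (a b c x y z : Bool) : cntB a b c ≤ cntB (a || x) (b || y) (c || z) := by
  cases a <;> cases b <;> cases c <;> cases x <;> cases y <;> cases z <;> simp [cntB]

-- the early-exit scan returns exactly "final flag count ≥ need"
theorem scan_eq (l : List String) (need : Int) (a b c : Bool) :
    scan_is_strategy l need a b c
      = decide (cntB (a || l.any (fun m => decide (m ∈ ["execute", "run", "trade", "signal", "generate_signal"])))
                     (b || l.any (fun m => PySem.Str.startswith m "on_"))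
                     (c || l.any (fun m => m == "init" || m == "__init__")) ≥ need) := by
  induction l generalizing a b c with
  | nil => simp [scan_is_strategy, cntB]
  | cons m rest ih =>
    rw [scan_is_strategy,
      show ((if a then (1:Int) else 0) + (if b then 1 else 0) + (if c then 1 else 0)) = cntB a b c from rfl]
    by_cases h : cntB a b c ≥ need
    · rw [if_pos h]
      exact (decide_eq_true (le_trans h (cnt_mono a b c _ _ _))).symm
    · rw [if_neg h, ih]
      simp only [List.any_cons, Bool.or_assoc]

theorem any_init (l : List String) :
    l.any (fun m => m == "init" || m == "__init__")
      = (decide ("init" ∈ l) || decide ("__init__" ∈ l)) := by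
  induction l with
  | nil => simp
  | cons x xs ih =>
    simp only [List.any_cons, ih, List.mem_cons]
    by_cases h1 : x = "init" <;> by_cases h2 : x = "__init__" <;> first | simp [h1, h2, Ne.symm h1, Ne.symm h2] | simp [h1, h2]

-- "count of five ≥ 2" equals "count of last three ≥ 2 - first two"
theorem threshold_eq (i1 i2 i3 i4 i5 : Bool) :
    decide ((if i1 then (1:Nat) else 0) + (if i2 then 1 else 0) + (if i3 then 1 else 0)
            + (if i4 then 1 else 0) + (if i5 then 1 else 0) ≥ 2)
      = decide (cntB i3 i4 i5 ≥ 2 - (if i1 then (1:Int) else 0) - (if i2 then 1 else 0)) := by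
  cases i1 <;> cases i2 <;> cases i3 <;> cases i4 <;> cases i5 <;> decide

-- ===== VERDICT (by name: the statement is the Claim_ definition above) =====
theorem is_strategy_class_py_spec : Claim_equal_is_strategy_class_py := by
  intro class_name methods _
  show is_strategy_class_py class_name methods = is_strategy_class_py_alt class_name methods
  simp only [is_strategy_class_py, is_strategy_class_py_alt, scan_eq, Bool.false_or,
    any_init, threshold_eq]
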